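-- pv_equiv track=rewrite | github.com/jaminsore/intro-to-ai | project/intro-to-ai-project/src/main.py | to_matrix_representation
-- ===== SOURCE A (Python) =====
-- def to_matrix_representation(assignment):
--     forms = sorted(set(form for form, _ in assignment))
--     nblocks = max(block for _, block in assignment)
--     rep = []
--     for form in forms:
--         asgnmnt = []
--         for block in range(1, nblocks + 1):
--             if (form, block) in assignment:
--                 asgnmnt.append(assignment[(form, block)])
--             else:
--                 asgnmnt.append(None)
--         rep.append(tuple(asgnmnt))
--     return rep
-- ===== SOURCE B (Python) =====
-- def to_matrix_representation(assignment):
--     forms = sorted(set(form for form, _ in assignment))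
--     nblocks = max(block for _, block in assignment)
--     row_index = {form: i for i, form in enumerate(forms)}
--     rows = [[None] * nblocks for _ in forms]
--     for (form, block), value in assignment.items():
--         if 1 <= block <= nblocks:
--             rows[row_index[form]][block - 1] = value
--     return [tuple(row) for row in rows]
-- ===== Notes on version B (the rewrite author's own statement) =====
-- stated objective: alternative
-- what changed: Instead of A's nested loop over forms x blocks with a dict lookup per cell, B preallocates an all-None forms x nblocks matrix plus a form-to-row-index dict and fills it in a single pass over assignment.items(), skipping out-of-range block keys.
import Mathlib
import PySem

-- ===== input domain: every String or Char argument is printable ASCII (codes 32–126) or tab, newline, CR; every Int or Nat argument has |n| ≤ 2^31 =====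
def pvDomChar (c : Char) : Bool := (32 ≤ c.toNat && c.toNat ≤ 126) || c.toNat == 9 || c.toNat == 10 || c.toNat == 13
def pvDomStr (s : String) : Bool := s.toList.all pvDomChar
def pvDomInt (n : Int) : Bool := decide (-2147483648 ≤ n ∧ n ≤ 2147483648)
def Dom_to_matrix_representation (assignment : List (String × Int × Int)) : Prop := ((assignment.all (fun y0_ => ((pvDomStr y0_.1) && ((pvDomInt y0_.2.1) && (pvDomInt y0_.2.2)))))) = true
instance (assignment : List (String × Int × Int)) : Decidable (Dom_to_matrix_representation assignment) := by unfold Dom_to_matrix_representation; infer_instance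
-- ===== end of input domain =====

-- B replaces A's forms×blocks dict-lookup double loop by preallocating the None matrix and
-- filling it in a single pass over the assignment items (objective: alternative decomposition).


-- ===== PORT A =====
def to_matrix_representation (assignment : List (String × Int × Int)) : List (List (Option Int)) :=
  let forms := PySem.List.sorted (PySem.Set.ofList (assignment.map (fun p => p.1))) (fun x => x) false
  match PySem.List.max? (assignment.map (fun p => p.2.1)) (fun x => x) with
  | none => []  -- Python's max raises ValueError here (empty assignment); excluded by Pre_
  | some nblocks =>
    forms.foldl (fun rep form =>
      rep ++ [(PySem.List.pyRange 1 (nblocks + 1) 1).foldl (fun asgnmnt block =>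
        -- '(form, block) in assignment' then 'assignment[(form, block)]': first-match lookup
        match assignment.find? (fun p => p.1 == form && p.2.1 == block) with
        | some p => asgnmnt ++ [some p.2.2]
        | none => asgnmnt ++ [(none : Option Int)]) []]) []

-- ===== PORT B =====
def to_matrix_representation_alt (assignment : List (String × Int × Int)) : List (List (Option Int)) :=
  let forms := PySem.List.sorted (PySem.Set.ofList (assignment.map (fun p => p.1))) (fun x => x) false
  match PySem.List.max? (assignment.map (fun p => p.2.1)) (fun x => x) with
  | none => []  -- Python's max raises ValueError here (empty assignment); excluded by Pre_
  | some nblocks =>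
    let rowIndex := (PySem.List.enumerate forms).foldl (fun d q => d.insert q.2 q.1) PySem.Dict.empty
    let rows0 := forms.map (fun _ => List.replicate nblocks.toNat (none : Option Int))
    let rows := assignment.foldl (fun rows p =>
      if 1 ≤ p.2.1 ∧ p.2.1 ≤ nblocks then
        -- rows[row_index[form]][block - 1] = value; both indices are always in range
        -- (row_index has every form; 1 ≤ block ≤ nblocks), so List.set is exact here
        let r := ((rowIndex.get? p.1).getD 0).toNat
        rows.set r ((rows.getD r []).set (p.2.1 - 1).toNat (some p.2.2))
      else rows) rows0
    rows.map (fun row => row)   -- [tuple(row) for row in rows]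

-- ===== PRECONDITION & SPEC =====
-- Pre_ excludes the empty list, on which A's max() raises ValueError, and association lists with a
-- duplicate (form, block) key, which cannot arise from A's Python dict argument and on which the
-- assoc-list reading of the dict is ambiguous.
def Pre_to_matrix_representation (assignment : List (String × Int × Int)) : Prop :=
  assignment ≠ [] ∧ (assignment.map (fun p => (p.1, p.2.1))).Nodup
instance (assignment : List (String × Int × Int)) : Decidable (Pre_to_matrix_representation assignment) := by unfold Pre_to_matrix_representation; infer_instance

def pvWitness_to_matrix_representation : (List (String × Int × Int)) := [("a", 1, 5), ("b", 2, 7)]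

def Spec_to_matrix_representation (assignment : List (String × Int × Int)) (out : List (List (Option Int))) : Prop := out = to_matrix_representation_alt assignment
instance (assignment : List (String × Int × Int)) (out : List (List (Option Int))) : Decidable (Spec_to_matrix_representation assignment out) := by unfold Spec_to_matrix_representation; infer_instance

-- ===== CLAIM (what is proved, stated in full; the proofs are below) =====
def Claim_equal_to_matrix_representation : Prop := ∀ (assignment : List (String × Int × Int)), Dom_to_matrix_representation assignment → Pre_to_matrix_representation assignment → Spec_to_matrix_representation assignment (to_matrix_representation assignment)

-- ===== LEMMAS AND PROOFS =====

-- the value the single pass leaves at key (f, b): the LAST matching item, else the accumulator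
def tmrLastFrom (l : List (String × Int × Int)) (f : String) (b : Int) (acc : Option Int) : Option Int :=
  l.foldl (fun acc p => if p.1 = f ∧ p.2.1 = b then some p.2.2 else acc) acc

-- matrix entry access used by the invariant
def tmrEntry (rows : List (List (Option Int))) (r c : Nat) : Option Int := (rows.getD r []).getD c none

lemma tmrLastFrom_cons (p : String × Int × Int) (l : List (String × Int × Int)) (f : String) (b : Int) (acc : Option Int) :
    tmrLastFrom (p :: l) f b acc = tmrLastFrom l f b (if p.1 = f ∧ p.2.1 = b then some p.2.2 else acc) := rfl

lemma tmrLastFrom_of_no_match (l : List (String × Int × Int)) (f : String) (b : Int) (acc : Option Int)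
    (h : ∀ p ∈ l, ¬(p.1 = f ∧ p.2.1 = b)) : tmrLastFrom l f b acc = acc := by
  induction l generalizing acc with
  | nil => rfl
  | cons q l ih =>
    rw [tmrLastFrom_cons, if_neg (h q (List.mem_cons_self))]
    exact ih _ (fun p hp => h p (List.mem_cons_of_mem _ hp))

-- with no duplicate (form, block) keys, the last match is the first match
lemma tmrLastFrom_eq_find (l : List (String × Int × Int)) (f : String) (b : Int)
    (hnd : (l.map (fun p => (p.1, p.2.1))).Nodup) :
    tmrLastFrom l f b none = (l.find? (fun p => p.1 == f && p.2.1 == b)).map (fun p => p.2.2) := by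
  induction l with
  | nil => rfl
  | cons q l ih =>
    rw [List.map_cons, List.nodup_cons] at hnd
    by_cases hq : q.1 = f ∧ q.2.1 = b
    · rw [tmrLastFrom_cons, if_pos hq]
      have hnm : ∀ p ∈ l, ¬(p.1 = f ∧ p.2.1 = b) := by
        intro p hp hc
        apply hnd.1
        rw [hq.1, hq.2, ← hc.1, ← hc.2]
        exact List.mem_map_of_mem hp
      rw [tmrLastFrom_of_no_match l f b _ hnm,
          List.find?_cons_of_pos (by simp [hq.1, hq.2])]
      rfl
    · rw [tmrLastFrom_cons, if_neg hq, List.find?_cons_of_neg, ih hnd.2]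
      simp only [Bool.and_eq_true, beq_iff_eq]
      exact fun hc => hq ⟨hc.1, hc.2⟩

lemma tmr_rowIndex_get (forms : List String) (hnd : forms.Nodup) (r : Nat) (hr : r < forms.length) :
    ((PySem.List.enumerate forms).foldl (fun d q => d.insert q.2 q.1) PySem.Dict.empty).get? forms[r]
      = some (r : Int) := by
  have hkeys : ((PySem.List.enumerate forms).map (fun q => q.2)).Nodup := by
    rw [PySem.List.map_snd_enumerate]; exact hnd
  have hfresh : ∀ q ∈ PySem.List.enumerate forms, (PySem.Dict.empty : PySem.Dict String Int).contains q.2 = false := by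
    intro q _; simp [pysem]
  have hitems := PySem.Dict.items_foldl_insert_fresh (l := PySem.List.enumerate forms)
      (k := fun q => q.2) (v := fun q => q.1) (d := PySem.Dict.empty) hfresh hkeys
  have hmem : ((forms[r] : String), (r : Int)) ∈
      ((PySem.List.enumerate forms).foldl (fun d q => d.insert q.2 q.1) PySem.Dict.empty).items := by
    rw [hitems]
    have : ((r : Int), forms[r]) ∈ PySem.List.enumerate forms := by
      rw [PySem.List.mem_enumerate_iff]
      exact ⟨r, hr, by simp⟩
    simpa using Or.inr (List.mem_map_of_mem (f := fun q => (q.2, q.1)) this)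
  have hknd : ((PySem.List.enumerate forms).foldl (fun d q => d.insert q.2 q.1) PySem.Dict.empty).keys.Nodup :=
    PySem.Dict.nodup_keys_foldl_insert_key _ _ _ _ (by simp [pysem])
  exact PySem.Dict.get?_of_mem_items _ hmem hknd

lemma tmrEntry_eq (rows : List (List (Option Int))) (r c : Nat) (hr : r < rows.length)
    (hc : c < rows[r].length) : tmrEntry rows r c = rows[r][c] := by
  unfold tmrEntry
  have h1 : rows.getD r [] = rows[r] := List.getD_eq_getElem _ _ hr
  rw [h1]
  exact List.getD_eq_getElem _ _ hc

-- the single filling pass, characterised entrywise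
lemma tmr_fill_invariant (forms : List String) (hnd : forms.Nodup) (nblocks : Int)
    (l : List (String × Int × Int)) (rows : List (List (Option Int)))
    (hl : ∀ p ∈ l, p.1 ∈ forms)
    (hlen : rows.length = forms.length)
    (hrow : ∀ r (h : r < rows.length), rows[r].length = nblocks.toNat) :
    let out := l.foldl (fun rows p =>
      if 1 ≤ p.2.1 ∧ p.2.1 ≤ nblocks then
        let r := ((((PySem.List.enumerate forms).foldl (fun d q => d.insert q.2 q.1) (PySem.Dict.empty : PySem.Dict String Int)).get? p.1).getD 0).toNat
        rows.set r ((rows.getD r []).set (p.2.1 - 1).toNat (some p.2.2))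
      else rows) rows
    out.length = forms.length ∧ (∀ r (h : r < out.length), out[r].length = nblocks.toNat) ∧
      (∀ r c, r < forms.length → c < nblocks.toNat →
        tmrEntry out r c = tmrLastFrom l (forms.getD r "") ((c : Int) + 1) (tmrEntry rows r c)) := by
  induction l generalizing rows with
  | nil => exact ⟨hlen, hrow, fun r c _ _ => rfl⟩
  | cons p l ih =>
    simp only [List.foldl_cons]
    obtain ⟨i, hi, hfi⟩ := List.mem_iff_getElem.mp (hl p List.mem_cons_self)
    have hidx := tmr_rowIndex_get forms hnd i hi
    rw [hfi] at hidx
    have hidxv : ((((PySem.List.enumerate forms).foldl (fun d q => d.insert q.2 q.1) (PySem.Dict.empty : PySem.Dict String Int)).get? p.1).getD 0).toNat = i := by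
      rw [hidx]; simp
    set rows' := (if 1 ≤ p.2.1 ∧ p.2.1 ≤ nblocks then
        let r := ((((PySem.List.enumerate forms).foldl (fun d q => d.insert q.2 q.1) (PySem.Dict.empty : PySem.Dict String Int)).get? p.1).getD 0).toNat
        rows.set r ((rows.getD r []).set (p.2.1 - 1).toNat (some p.2.2))
      else rows) with hrows'
    have hilt : i < rows.length := by omega
    have hgetDi : rows.getD i [] = rows[i] := List.getD_eq_getElem _ _ hilt
    have hrows2 : rows' = if 1 ≤ p.2.1 ∧ p.2.1 ≤ nblocks then
        rows.set i ((rows.getD i []).set (p.2.1 - 1).toNat (some p.2.2)) else rows := by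
      rw [hrows', hidxv]
    have hlen' : rows'.length = forms.length := by
      rw [hrows2]; split_ifs <;> simp [hlen]
    have hrow' : ∀ r (h : r < rows'.length), rows'[r].length = nblocks.toNat := by
      rw [hrows2]
      split_ifs with hg
      · intro r hr
        rw [List.getElem_set]
        split_ifs with he
        · rw [List.length_set, hgetDi]
          exact hrow i hilt
        · exact hrow r (by simpa using hr)
      · exact hrow
    have hstep : ∀ r c, r < forms.length → c < nblocks.toNat →
        tmrEntry rows' r c =
          (if p.1 = forms.getD r "" ∧ p.2.1 = (c : Int) + 1 then some p.2.2 else tmrEntry rows r c) := by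
      intro r c hrf hc
      have hcint : (c : Int) < nblocks := by omega
      have e1 : (rows.set i ((rows.getD i []).set (p.2.1 - 1).toNat (some p.2.2))).getD i []
          = (rows.getD i []).set (p.2.1 - 1).toNat (some p.2.2) := by
        rw [List.getD_eq_getElem _ _ (by simpa using hilt), List.getElem_set, if_pos rfl]
      have eL : tmrEntry (rows.set i ((rows.getD i []).set (p.2.1 - 1).toNat (some p.2.2))) i c
          = ((rows.getD i []).set (p.2.1 - 1).toNat (some p.2.2)).getD c none := by
        unfold tmrEntry; rw [e1]
      have hclen : c < ((rows[i]).set (p.2.1 - 1).toNat (some p.2.2)).length := by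
        rw [List.length_set, hrow i hilt]; omega
      rw [hrows2]
      split_ifs with hg hcond hcond
      · -- guard true, key matches this (form, block)
        have hri : r = i := by
          have h1 : forms[i] = forms[r] := by
            rw [hfi, hcond.1, List.getD_eq_getElem _ _ hrf]
          exact ((List.Nodup.getElem_inj_iff hnd).mp h1).symm
        have hblk : (p.2.1 - 1).toNat = c := by omega
        rw [hri, eL, hgetDi, List.getD_eq_getElem _ _ hclen, List.getElem_set]
        simp [hblk]
      · -- guard true, key does not match
        by_cases hri : r = i
        · have hblk : (p.2.1 - 1).toNat ≠ c := by
            intro he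
            apply hcond
            refine ⟨?_, by omega⟩
            rw [hri, List.getD_eq_getElem _ _ hi]
            exact hfi.symm
          rw [hri, eL, hgetDi, List.getD_eq_getElem _ _ hclen, List.getElem_set, if_neg hblk,
              tmrEntry_eq rows i c hilt (by rw [hrow i hilt]; omega)]
        · have hne : i ≠ r := fun h => hri h.symm
          have hrlt : r < rows.length := by omega
          rw [tmrEntry_eq _ r c (by simpa using hrlt)
                (by rw [List.getElem_set_ne hne]; rw [hrow r hrlt]; omega)]
          simp only [List.getElem_set_ne hne]
          rw [tmrEntry_eq rows r c hrlt (by rw [hrow r hrlt]; omega)]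
      · -- guard false but block = c+1 ∈ [1, nblocks]: impossible
        exfalso
        apply hg
        rw [hcond.2]
        omega
      · rfl
    obtain ⟨h1, h2, h3⟩ := ih rows' (fun q hq => hl q (List.mem_cons_of_mem _ hq)) hlen' hrow'
    refine ⟨h1, h2, fun r c hrf hc => ?_⟩
    rw [h3 r c hrf hc, tmrLastFrom_cons, hstep r c hrf hc]

lemma tmr_A_map (assignment : List (String × Int × Int)) (nblocks : Int)
    (forms : List String) :
    forms.foldl (fun rep form =>
      rep ++ [(PySem.List.pyRange 1 (nblocks + 1) 1).foldl (fun asgnmnt block =>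
        match assignment.find? (fun p => p.1 == form && p.2.1 == block) with
        | some p => asgnmnt ++ [some p.2.2]
        | none => asgnmnt ++ [(none : Option Int)]) []]) []
    = forms.map (fun form => (PySem.List.pyRange 1 (nblocks + 1) 1).map (fun block =>
        (assignment.find? (fun p => p.1 == form && p.2.1 == block)).map (fun p => p.2.2))) := by
  have hin : ∀ (form : String),
      (PySem.List.pyRange 1 (nblocks + 1) 1).foldl (fun asgnmnt block =>
        match assignment.find? (fun p => p.1 == form && p.2.1 == block) with
        | some p => asgnmnt ++ [some p.2.2]
        | none => asgnmnt ++ [(none : Option Int)]) []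
      = (PySem.List.pyRange 1 (nblocks + 1) 1).map (fun block =>
          (assignment.find? (fun p => p.1 == form && p.2.1 == block)).map (fun p => p.2.2)) := by
    intro form
    have hbody : (fun (asgnmnt : List (Option Int)) (block : Int) =>
        match assignment.find? (fun p => p.1 == form && p.2.1 == block) with
        | some p => asgnmnt ++ [some p.2.2]
        | none => asgnmnt ++ [(none : Option Int)])
        = fun asgnmnt block => asgnmnt ++
            [(assignment.find? (fun p => p.1 == form && p.2.1 == block)).map (fun p => p.2.2)] := by
      funext a b
      rcases hf : assignment.find? (fun p => p.1 == form && p.2.1 == b) with _ | p <;> simp [hf]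
    rw [hbody, PySem.List.foldl_append_singleton_eq_map, List.nil_append]
  rw [PySem.List.foldl_append_singleton_eq_map, List.nil_append]
  exact List.map_congr_left (fun a _ => hin a)

theorem to_matrix_representation_spec : Claim_equal_to_matrix_representation := by
  unfold Claim_equal_to_matrix_representation
  intro assignment _ hpre
  unfold Spec_to_matrix_representation to_matrix_representation to_matrix_representation_alt
  cases hmax : PySem.List.max? (assignment.map (fun p => p.2.1)) (fun x => x) with
  | none => rfl
  | some nblocks =>
    have hndF : (PySem.List.sorted (PySem.Set.ofList (assignment.map (fun p => p.1))) (fun x => x) false).Nodup :=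
      (PySem.List.sorted_perm _ _ _).nodup_iff.mpr (PySem.Set.nodup_ofList _)
    have hlF : ∀ p ∈ assignment, p.1 ∈
        PySem.List.sorted (PySem.Set.ofList (assignment.map (fun p => p.1))) (fun x => x) false := by
      intro p hp
      rw [PySem.List.mem_sorted, PySem.Set.mem_ofList]
      exact List.mem_map_of_mem hp
    set forms := PySem.List.sorted (PySem.Set.ofList (assignment.map (fun p => p.1))) (fun x => x) false with hforms
    have hrows0len : (forms.map (fun _ => List.replicate nblocks.toNat (none : Option Int))).length = forms.length := by
      simp
    have hrows0row : ∀ r (h : r < (forms.map (fun _ => List.replicate nblocks.toNat (none : Option Int))).length),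
        (forms.map (fun _ => List.replicate nblocks.toNat (none : Option Int)))[r].length = nblocks.toNat := by
      intro r h; simp
    obtain ⟨hL, hR, hE⟩ := tmr_fill_invariant forms hndF nblocks assignment
      (forms.map (fun _ => List.replicate nblocks.toNat (none : Option Int))) hlF hrows0len hrows0row
    simp only [tmr_A_map, List.map_id']
    apply List.ext_getElem (by rw [List.length_map]; exact hL.symm)
    intro r hr1 hr2
    rw [List.getElem_map]
    apply List.ext_getElem
    · rw [List.length_map, PySem.List.length_pyRange_one, hR r hr2]
      congr 1
      omega
    · intro c hc1 hc2
      have hcW : c < nblocks.toNat := by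
        rw [List.length_map, PySem.List.length_pyRange_one] at hc1
        omega
      have hrF : r < forms.length := by rw [List.length_map] at hr1; exact hr1
      rw [List.getElem_map, PySem.List.getElem_pyRange_one]
      rw [← tmrEntry_eq _ r c hr2 hc2, hE r c hrF hcW]
      have h0 : tmrEntry (forms.map (fun _ => List.replicate nblocks.toNat (none : Option Int))) r c = none := by
        rw [tmrEntry_eq _ r c (by simpa using hrF) (by simpa using hcW)]
        simp
      rw [h0, tmrLastFrom_eq_find assignment _ _ hpre.2, List.getD_eq_getElem _ _ hrF,
          Int.add_comm (c : Int) 1]
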